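-- pv_equiv track=rewrite | github.com/conormccauley1999/CompetitiveProgramming | Kattis/addingwords.py | parse
-- ===== SOURCE A (Python) =====
-- def parse(vs, es):
--     for e in es:
--         if e in ['+', '-', '=']:
--             continue
--         if e not in vs:
--             return 'unknown'
--     t = vs[es[0]]
--     for i in range(1, len(es), 2):
--         if es[i] == '+':
--             t += vs[es[i + 1]]
--         else:
--             t -= vs[es[i + 1]]
--     if t not in vs.values():
--         return 'unknown'
--     for k, v in vs.items():
--         if t == v:
--             return k
-- ===== SOURCE B (Python) =====
-- def parse(vs, es):
--     ops = {'+', '-', '='}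
--     if any(e not in ops and e not in vs for e in es):
--         return 'unknown'
--     t = vs[es[0]]
--     rest = es[1:]
--     while rest:
--         op, w, rest = rest[0], rest[1], rest[2:]
--         t = t + vs[w] if op == '+' else t - vs[w]
--     rev = {}
--     for k, v in vs.items():
--         rev.setdefault(v, k)
--     return rev.get(t, 'unknown')
-- ===== Notes on version B (the rewrite author's own statement) =====
-- stated objective: idiomatic
-- what changed: B validates tokens with a single any() generator, consumes the expression by destructuring (op, word) pairs off the tail of the token list instead of A's index loop with range(1,len(es),2), and replaces A's two final linear scans (t in vs.values() followed by an items() scan for the first matching key) by a reverse value->first-key index built once with setdefault and a single rev.get(t,'unknown') lookup.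
import Mathlib
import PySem

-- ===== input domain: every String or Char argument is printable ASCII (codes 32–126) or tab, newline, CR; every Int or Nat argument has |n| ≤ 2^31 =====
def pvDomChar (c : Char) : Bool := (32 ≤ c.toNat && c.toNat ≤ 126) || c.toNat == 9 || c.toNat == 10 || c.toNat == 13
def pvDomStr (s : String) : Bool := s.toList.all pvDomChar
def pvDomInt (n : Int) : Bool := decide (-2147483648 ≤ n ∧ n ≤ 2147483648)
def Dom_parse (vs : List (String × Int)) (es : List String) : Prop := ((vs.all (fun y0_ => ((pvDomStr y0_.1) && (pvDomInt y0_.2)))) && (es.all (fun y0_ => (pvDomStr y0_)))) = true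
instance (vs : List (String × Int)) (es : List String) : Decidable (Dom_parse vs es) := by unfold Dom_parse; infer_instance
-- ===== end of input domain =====

-- B replaces A's two final linear value scans by a reverse value->first-key index built
-- once with setdefault, consumes the expression by destructuring (op, word) pairs instead
-- of an index loop, and validates tokens with a single any(); objective: idiomatic.

-- ===== PORT A =====
-- first loop of A: returns true iff some token is neither an operator nor a key of vs
-- (Python returns 'unknown' at the first such token)
def checkA (vs : List (String × Int)) : List String → Bool
  | [] => false
  | e :: rest =>
    if ["+", "-", "="].contains e then checkA vs rest
    else if !(PySem.Dict.contains (PySem.Dict.mk vs) e) then true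
    else checkA vs rest

-- body of A's second loop: one step for index i of range(1, len(es), 2)
def stepA (vs : List (String × Int)) (es : List String) (acc : Option Int) (i : Int) : Option Int :=
  acc.bind fun t =>
    (PySem.List.pyGet? es i).bind fun op =>
    (PySem.List.pyGet? es (i + 1)).bind fun w =>
    (PySem.Dict.get? (PySem.Dict.mk vs) w).map fun v =>
      if op = "+" then t + v else t - v

-- t = vs[es[0]] followed by the accumulation loop; none exactly where Python raises
def evalA (vs : List (String × Int)) (es : List String) : Option Int :=
  ((PySem.List.pyGet? es 0).bind fun e0 => PySem.Dict.get? (PySem.Dict.mk vs) e0).bind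
    fun t0 => (PySem.List.pyRange 1 (es.length : Int) 2).foldl (stepA vs es) (some t0)

-- A's last loop: first key whose value is t ("" = the unreachable fall-off-the-end, guarded by the values() test)
def scanA (t : Int) : List (String × Int) → String
  | [] => ""
  | (k, v) :: rest => if t = v then k else scanA t rest

def parse (vs : List (String × Int)) (es : List String) : String :=
  if checkA vs es then "unknown"
  else
    match evalA vs es with
    | none => ""   -- Python raises here (IndexError/KeyError); excluded by Pre_parse
    | some t =>
      if (PySem.Dict.values (PySem.Dict.mk vs)).contains t then scanA t vs
      else "unknown"

-- ===== PORT B =====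
-- B's while loop: pop an (op, word) pair off the remaining tokens; none where Source B raises
def bEval (vs : List (String × Int)) : Int → List String → Option Int
  | t, [] => some t
  | _, [_] => none   -- rest[1] raises IndexError in Source B
  | t, op :: w :: rest =>
    match PySem.Dict.get? (PySem.Dict.mk vs) w with
    | none => none   -- vs[w] raises KeyError in Source B
    | some v => bEval vs (if op = "+" then t + v else t - v) rest

-- reverse index: value -> first key with that value (rev.setdefault(v, k) loop)
def bRev (vs : List (String × Int)) : PySem.Dict Int String :=
  vs.foldl (fun r kv => PySem.Dict.setdefault r kv.2 kv.1) PySem.Dict.empty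

def parse_alt (vs : List (String × Int)) (es : List String) : String :=
  if es.any (fun e => !(["+", "-", "="].contains e) && !(PySem.Dict.contains (PySem.Dict.mk vs) e)) then
    "unknown"
  else
    match (PySem.List.pyGet? es 0).bind fun e0 => PySem.Dict.get? (PySem.Dict.mk vs) e0 with
    | none => ""   -- Source B raises here (IndexError/KeyError); excluded by Pre_parse
    | some t0 =>
      match bEval vs t0 (PySem.List.slice es (some 1) none) with
      | none => ""   -- Source B raises here; excluded by Pre_parse
      | some t => PySem.Dict.getD (bRev vs) t "unknown"

-- ===== PRECONDITION & SPEC =====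
-- Pre_parse holds exactly where Python A returns normally: either some token is neither an
-- operator nor a key (A returns 'unknown' before any indexing), or the expression is
-- non-empty, of odd length, with every even-position token a key of vs (so vs[es[0]],
-- es[i+1] and vs[es[i+1]] all succeed). Outside Pre_parse A raises IndexError or KeyError.
def Pre_parse (vs : List (String × Int)) (es : List String) : Prop :=
  (∃ e ∈ es, (["+", "-", "="].contains e) = false ∧ PySem.Dict.contains (PySem.Dict.mk vs) e = false) ∨
  (es ≠ [] ∧ es.length % 2 = 1 ∧
    ∀ i : Nat, i < es.length → i % 2 = 0 → PySem.Dict.contains (PySem.Dict.mk vs) (es.getD i "") = true)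

instance (vs : List (String × Int)) (es : List String) : Decidable (Pre_parse vs es) := by
  unfold Pre_parse; infer_instance

def pvWitness_parse : (List (String × Int)) × List String :=
  ([("a", 1), ("b", 2), ("c", 3)], ["a", "+", "b"])

def Spec_parse (vs : List (String × Int)) (es : List String) (out : String) : Prop := out = parse_alt vs es
instance (vs : List (String × Int)) (es : List String) (out : String) : Decidable (Spec_parse vs es out) := by unfold Spec_parse; infer_instance

-- ===== CLAIM (what is proved, stated in full; the proofs are below) =====
def Claim_equal_parse : Prop := ∀ (vs : List (String × Int)) (es : List String), Dom_parse vs es → Pre_parse vs es → Spec_parse vs es (parse vs es)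

-- ===== LEMMAS AND PROOFS =====

-- A's early-return validation loop is B's any()
lemma checkA_eq_any (vs : List (String × Int)) (es : List String) :
    checkA vs es = es.any (fun e => !(["+", "-", "="].contains e) && !(PySem.Dict.contains (PySem.Dict.mk vs) e)) := by
  induction es with
  | nil => rfl
  | cons e rest ih =>
    by_cases h1 : e = "+" ∨ e = "-" ∨ e = "="
    · rcases h1 with rfl | rfl | rfl <;> simp [checkA, ih]
    · have n1 : ¬ e = "+" := fun h => h1 (Or.inl h)
      have n2 : ¬ e = "-" := fun h => h1 (Or.inr (Or.inl h))
      have n3 : ¬ e = "=" := fun h => h1 (Or.inr (Or.inr h))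
      have hb : (["+", "-", "="].contains e) = false := by simp [n1, n2, n3]
      cases h2 : PySem.Dict.contains (PySem.Dict.mk vs) e with
      | true =>
        simp only [checkA, List.any_cons, hb, h2, Bool.not_true, Bool.not_false,
          Bool.and_false, Bool.false_or]
        exact ih
      | false =>
        simp only [checkA, List.any_cons, hb, h2, Bool.not_false, Bool.true_and,
          Bool.true_or]
        rfl

lemma pyRange_two_nil (a b : Int) (h : b ≤ a) : PySem.List.pyRange a b 2 = [] := by
  rw [PySem.List.pyRange_of_pos a b (by norm_num)]
  rw [if_neg (by omega)]
  simp

lemma pyRange_two_cons (a b : Int) (h : a < b) :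
    PySem.List.pyRange a b 2 = a :: PySem.List.pyRange (a + 2) b 2 := by
  rw [PySem.List.pyRange_of_pos a b (by norm_num), PySem.List.pyRange_of_pos (a + 2) b (by norm_num)]
  by_cases h2 : a + 2 < b
  · rw [if_pos h, if_pos h2]
    have : ((b - a + 2 - 1) / 2).toNat = ((b - (a + 2) + 2 - 1) / 2).toNat + 1 := by omega
    rw [this, List.range_succ_eq_map]
    simp only [List.map_cons, List.map_map]
    congr 1
    · simp
    · apply List.map_congr_left
      intro k _
      simp [Function.comp]
      ring
  · rw [if_pos h, if_neg h2]
    have : ((b - a + 2 - 1) / 2).toNat = 1 := by omega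
    rw [this]
    simp

lemma foldl_stepA_none (vs : List (String × Int)) (es : List String) (l : List Int) :
    l.foldl (stepA vs es) none = none := by
  induction l with
  | nil => rfl
  | cons i l ih => simpa [stepA] using ih

-- A's indexed accumulation loop over pre ++ tail, started at index pre.length, is B's
-- pair-destructuring recursion over tail
theorem evalLoop (vs : List (String × Int)) (tail : List String) :
    ∀ (pre : List String) (t : Int),
      (PySem.List.pyRange (pre.length : Int) ((pre ++ tail).length : Int) 2).foldl
          (stepA vs (pre ++ tail)) (some t)
        = bEval vs t tail := by
  match tail with
  | [] =>
    intro pre t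
    rw [pyRange_two_nil _ _ (by simp)]
    rfl
  | [x] =>
    intro pre t
    have hlen : ((pre ++ [x]).length : Int) = (pre.length : Int) + 1 := by
      simp
    rw [hlen, pyRange_two_cons _ _ (by omega), pyRange_two_nil _ _ (by omega)]
    have hop : PySem.List.pyGet? (pre ++ [x]) (pre.length : Int) = some x :=
      PySem.List.pyGet?_append_length pre [] x
    have hw : PySem.List.pyGet? (pre ++ [x]) ((pre.length : Int) + 1) = none := by
      have : ((pre.length : Int) + 1) = (((pre ++ [x]).length : Nat) : Int) := by simp
      rw [this, PySem.List.pyGet?_natCast]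
      simp
    simp [stepA, hw, bEval]
  | op :: w :: rest =>
    intro pre t
    have hlen : ((pre ++ op :: w :: rest).length : Int)
        = (pre.length : Int) + 2 + (rest.length : Int) := by
      simp; omega
    rw [hlen, pyRange_two_cons _ _ (by omega)]
    simp only [List.foldl_cons]
    have hop : PySem.List.pyGet? (pre ++ op :: w :: rest) (pre.length : Int) = some op :=
      PySem.List.pyGet?_append_length pre (w :: rest) op
    have hw : PySem.List.pyGet? (pre ++ op :: w :: rest) ((pre.length : Int) + 1) = some w := by
      have heq : pre ++ op :: w :: rest = (pre ++ [op]) ++ w :: rest := by simp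
      have hi : (pre.length : Int) + 1 = (((pre ++ [op]).length : Nat) : Int) := by simp
      rw [heq, hi]
      exact PySem.List.pyGet?_append_length (pre ++ [op]) rest w
    cases hv : PySem.Dict.get? (PySem.Dict.mk vs) w with
    | none =>
      simp only [stepA, Option.bind_some, hop, hw, hv, Option.map_none]
      rw [foldl_stepA_none]
      simp [bEval, hv]
    | some v =>
      simp only [stepA, Option.bind_some, hop, hw, hv, Option.map_some]
      have hassoc : pre ++ op :: w :: rest = (pre ++ [op, w]) ++ rest := by simp
      have hstart : (pre.length : Int) + 2 = (((pre ++ [op, w]).length : Nat) : Int) := by simp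
      have hstop : (((pre ++ [op, w]).length : Nat) : Int) + (rest.length : Int)
          = ((((pre ++ [op, w]) ++ rest).length : Nat) : Int) := by simp; omega
      rw [hassoc, hstart, hstop]
      rw [evalLoop vs rest (pre ++ [op, w]) (if op = "+" then t + v else t - v)]
      simp [bEval, hv]

-- A's evaluation equals B's: fetch t0 = vs[es[0]] then fold the tail pairwise
lemma evalA_eq (vs : List (String × Int)) (es : List String) :
    evalA vs es
      = ((PySem.List.pyGet? es 0).bind fun e0 => PySem.Dict.get? (PySem.Dict.mk vs) e0).bind
          (fun t0 => bEval vs t0 es.tail) := by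
  cases es with
  | nil => rfl
  | cons e0 rest =>
    rw [evalA, PySem.List.pyGet?_zero_cons]
    cases hv : PySem.Dict.get? (PySem.Dict.mk vs) e0 with
    | none => simp [hv]
    | some t0 =>
      simp only [hv, Option.bind_some]
      have h1 : (1 : Int) = (([e0] : List String).length : Int) := by simp
      have h2 : ((e0 :: rest).length : Int) = ((([e0] ++ rest : List String)).length : Int) := by simp
      have h3 : (e0 :: rest : List String) = [e0] ++ rest := rfl
      rw [h1, h2, h3, evalLoop vs rest [e0] t0]
      rfl

-- first key with value t, as an Option (proof-side view of both final phases)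
def scan? (t : Int) : List (String × Int) → Option String
  | [] => none
  | (k, v) :: rest => if t = v then some k else scan? t rest

lemma bRev_get? (t : Int) :
    ∀ (vs : List (String × Int)) (r : PySem.Dict Int String),
      PySem.Dict.get? (vs.foldl (fun r kv => PySem.Dict.setdefault r kv.2 kv.1) r) t
        = (PySem.Dict.get? r t).or (scan? t vs) := by
  intro vs
  induction vs with
  | nil => intro r; simp [scan?]
  | cons kv rest ih =>
    intro r
    obtain ⟨k, v⟩ := kv
    simp only [List.foldl_cons]
    rw [ih]
    have hstep : PySem.Dict.get? (PySem.Dict.setdefault r v k) t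
        = (PySem.Dict.get? r t).or (if t = v then some k else none) := by
      cases hc : PySem.Dict.contains r v with
      | true =>
        rw [PySem.Dict.setdefault_of_contains r k hc]
        by_cases ht : t = v
        · subst ht
          have := PySem.Dict.contains_eq_isSome_get? r t
          rw [hc] at this
          obtain ⟨u, hu⟩ := Option.isSome_iff_exists.mp this.symm
          simp [hu]
        · simp [ht]
      | false =>
        rw [PySem.Dict.setdefault_of_not_contains r k hc]
        rw [PySem.Dict.get?_insert]
        by_cases ht : t = v
        · subst ht
          have hz : PySem.Dict.get? r t = none :=
            (PySem.Dict.get?_eq_none_iff_contains r t).mpr hc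
          simp [hz]
        · simp [ht]
    rw [hstep]
    have : scan? t ((k, v) :: rest) = (if t = v then some k else none).or (scan? t rest) := by
      by_cases ht : t = v <;> simp [scan?, ht]
    rw [this, Option.or_assoc]

lemma scan?_eq (t : Int) (vs : List (String × Int)) :
    (if (vs.map Prod.snd).contains t then scanA t vs else "unknown")
      = (scan? t vs).getD "unknown" := by
  induction vs with
  | nil => simp [scan?]
  | cons kv rest ih =>
    obtain ⟨k, v⟩ := kv
    by_cases ht : t = v
    · subst ht
      simp [scan?, scanA]
    · have hb1 : (t == v) = false := by simp [ht]
      simp only [List.map_cons, List.contains_cons, scan?, scanA, if_neg ht, hb1,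
        Bool.false_or]
      exact ih

-- A's 'values membership then items scan' equals a lookup in B's reverse index
lemma final_eq (vs : List (String × Int)) (t : Int) :
    (if (PySem.Dict.values (PySem.Dict.mk vs)).contains t then scanA t vs else "unknown")
      = PySem.Dict.getD (bRev vs) t "unknown" := by
  rw [PySem.Dict.getD_eq_get?_getD, bRev, bRev_get? t vs PySem.Dict.empty]
  rw [PySem.Dict.get?_empty]
  simp only [Option.none_or]
  rw [PySem.Dict.values_mk]
  exact scan?_eq t vs

theorem parse_eq (vs : List (String × Int)) (es : List String) :
    parse vs es = parse_alt vs es := by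
  rw [parse, parse_alt, checkA_eq_any, PySem.List.slice_from_one]
  by_cases h : es.any (fun e => !(["+", "-", "="].contains e) && !(PySem.Dict.contains (PySem.Dict.mk vs) e)) = true
  · rw [if_pos h, if_pos h]
  · rw [if_neg h, if_neg h]
    rw [evalA_eq]
    cases hX : (PySem.List.pyGet? es 0).bind fun e0 => PySem.Dict.get? (PySem.Dict.mk vs) e0 with
    | none => rfl
    | some t0 =>
      simp only [Option.bind_some]
      cases hB : bEval vs t0 es.tail with
      | none => rfl
      | some t => exact final_eq vs t

-- ===== VERDICT (by name: the statement is the Claim_ definition above) =====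
theorem parse_spec : Claim_equal_parse := by
  intro vs es _ _
  unfold Spec_parse
  exact parse_eq vs es
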